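-- pv_equiv track=rewrite | github.com/SatishUrewar/Marvellous_Assignments | Assignment 11/Assignment11_5.py | CntZero
-- ===== SOURCE A (Python) =====
-- def CntZero(no,n1):
--     if (n1==len(no)):
--      return 0
--     count=0
--     crntnum=no[n1]
--     rcount=CntZero(no,n1+1)
--     if (crntnum==0):
--      count=1
--     return count+rcount
-- ===== SOURCE B (Python) =====
-- def CntZero(no, n1):
--     count = 0
--     for i in range(n1, len(no)):
--         if no[i] == 0:
--             count += 1
--     return count
-- ===== Notes on version B (the rewrite author's own statement) =====
-- stated objective: simpler
-- what changed: Replaces A's recursion (one stack frame per element, combining on the way back) with a single iterative index loop accumulating the count.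
-- outside the precondition, e.g. on CntZero([1, 0], 3): A raises IndexError, B returns 0
-- crash fix: For n1 > len(no), A recurses past the end and raises IndexError while B's empty range loop returns 0. — e.g. on CntZero([1, 0], 3): A raises IndexError, B returns 0
import Mathlib
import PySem

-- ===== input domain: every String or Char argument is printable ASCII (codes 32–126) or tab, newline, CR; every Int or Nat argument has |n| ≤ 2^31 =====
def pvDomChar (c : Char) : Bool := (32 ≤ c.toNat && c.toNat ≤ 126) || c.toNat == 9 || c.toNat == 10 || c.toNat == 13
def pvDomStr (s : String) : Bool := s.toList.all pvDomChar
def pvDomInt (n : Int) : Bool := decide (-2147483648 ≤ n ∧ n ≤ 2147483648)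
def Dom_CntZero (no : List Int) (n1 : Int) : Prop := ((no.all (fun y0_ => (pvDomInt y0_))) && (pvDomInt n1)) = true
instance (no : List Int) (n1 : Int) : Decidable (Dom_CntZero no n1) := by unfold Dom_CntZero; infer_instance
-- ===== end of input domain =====

-- B replaces A's recursion by a single iterative index loop (simpler: O(1) space instead of O(n) stack).

-- ===== PORT A =====
-- A is recursive on n1 → n1+1; the fuel bounds the recursion depth and is never
-- exhausted inside Pre_ (depth ≤ 2*len+2 when -len ≤ n1 ≤ len); pyGet? = none
-- is Python's IndexError, also excluded by Pre_.
def CntZeroA (fuel : Nat) (no : List Int) (n1 : Int) : Int :=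
  match fuel with
  | 0 => 0
  | fuel + 1 =>
    if n1 = (no.length : Int) then 0
    else
      match PySem.List.pyGet? no n1 with
      | none => 0
      | some crntnum =>
        let rcount := CntZeroA fuel no (n1 + 1)
        let count : Int := if crntnum = 0 then 1 else 0
        count + rcount

def CntZero (no : List Int) (n1 : Int) : Int := CntZeroA (2 * no.length + 2) no n1

-- ===== PORT B =====
def CntZero_alt (no : List Int) (n1 : Int) : Int :=
  (PySem.List.pyRange n1 (no.length : Int) 1).foldl
    (fun count i => if PySem.List.pyGet? no i = some 0 then count + 1 else count) 0

-- ===== PRECONDITION & SPEC =====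
-- A raises IndexError on no[n1] when n1 > len(no) or n1 < -len(no); Pre_ excludes exactly those.
def Pre_CntZero (no : List Int) (n1 : Int) : Prop :=
  -(no.length : Int) ≤ n1 ∧ n1 ≤ (no.length : Int)
instance (no : List Int) (n1 : Int) : Decidable (Pre_CntZero no n1) := by unfold Pre_CntZero; infer_instance

def pvWitness_CntZero : List Int × Int := ([0, 3, 0, -1], -2)

-- For n1 > len(no), A indexes no[n1] past the end and raises IndexError while B's empty range loop returns 0.
def Raises_CntZero (no : List Int) (n1 : Int) : Prop := (no.length : Int) < n1
instance (no : List Int) (n1 : Int) : Decidable (Raises_CntZero no n1) := by unfold Raises_CntZero; infer_instance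
def pvRaiseWitness_CntZero : List Int × Int := ([1, 0], 3)
def pvRaiseWitnessOut_CntZero : Int := 0

def Spec_CntZero (no : List Int) (n1 : Int) (out : Int) : Prop := out = CntZero_alt no n1
instance (no : List Int) (n1 : Int) (out : Int) : Decidable (Spec_CntZero no n1 out) := by unfold Spec_CntZero; infer_instance

-- ===== CLAIM (what is proved, stated in full; the proofs are below) =====
def Claim_equal_CntZero : Prop := ∀ (no : List Int) (n1 : Int), Dom_CntZero no n1 → Pre_CntZero no n1 → Spec_CntZero no n1 (CntZero no n1)
def Claim_raises_CntZero : Prop := (∀ (no : List Int) (n1 : Int), Dom_CntZero no n1 → Raises_CntZero no n1 → ¬ Pre_CntZero no n1) ∧ (Dom_CntZero (pvRaiseWitness_CntZero.1) (pvRaiseWitness_CntZero.2) ∧ Raises_CntZero (pvRaiseWitness_CntZero.1) (pvRaiseWitness_CntZero.2) ∧ CntZero_alt (pvRaiseWitness_CntZero.1) (pvRaiseWitness_CntZero.2) = pvRaiseWitnessOut_CntZero)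

-- ===== LEMMAS AND PROOFS =====

-- B's loop split at its first iteration: alt(n1) = (1 if no[n1]==0 else 0) + alt(n1+1).
lemma alt_step (no : List Int) (n1 : Int) (h : n1 < (no.length : Int)) :
    CntZero_alt no n1 =
      (if PySem.List.pyGet? no n1 = some 0 then (1 : Int) else 0) + CntZero_alt no (n1 + 1) := by
  unfold CntZero_alt
  rw [PySem.List.pyRange_one_cons h]
  rw [List.foldl_cons]
  rw [PySem.List.foldl_ite_add_one, PySem.List.foldl_ite_add_one]
  split_ifs <;> ring

lemma alt_end (no : List Int) : CntZero_alt no (no.length : Int) = 0 := by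
  unfold CntZero_alt
  rw [PySem.List.pyRange_one_eq_nil le_rfl]
  rfl

lemma fuel_lemma (no : List Int) : ∀ (fuel : Nat) (n1 : Int),
    -(no.length : Int) ≤ n1 → n1 ≤ (no.length : Int) →
    ((no.length : Int) - n1).toNat < fuel →
    CntZeroA fuel no n1 = CntZero_alt no n1 := by
  intro fuel
  induction fuel with
  | zero => intro n1 _ _ hf; omega
  | succ fuel ih =>
    intro n1 hlo hhi hf
    unfold CntZeroA
    by_cases heq : n1 = (no.length : Int)
    · simp [heq, alt_end]
    · have hlt : n1 < (no.length : Int) := lt_of_le_of_ne hhi heq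
      have hin : PySem.List.pyGet? no n1 ≠ none := by
        intro hnone
        rw [PySem.List.pyGet?_eq_none_iff] at hnone
        simp only [PySem.Raise.InRange] at hnone
        omega
      obtain ⟨x, hx⟩ := Option.ne_none_iff_exists'.mp hin
      rw [if_neg heq, hx]
      have := ih (n1 + 1) (by omega) (by omega) (by omega)
      rw [alt_step no n1 hlt, hx, this]
      by_cases hx0 : x = 0 <;> simp [hx0]

-- ===== VERDICT (by name: the statement is the Claim_ definition above) =====
theorem CntZero_spec : Claim_equal_CntZero := by
  intro no n1 _ hpre
  obtain ⟨h1, h2⟩ := hpre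
  unfold Spec_CntZero CntZero
  exact fuel_lemma no (2 * no.length + 2) n1 h1 h2 (by omega)

@[simp] theorem CntZero_raises : Claim_raises_CntZero := by
  unfold Claim_raises_CntZero
  exact ⟨fun no n1 _ hr hpre => by unfold Raises_CntZero at hr; exact absurd hpre.2 (not_le.mpr hr), by decide⟩
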